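-- pv_equiv track=rewrite | github.com/Neili488/proyecto_final_1 | proyecto.py | parse_pares
-- ===== SOURCE A (Python) =====
-- def parse_objeto(tokens, index):
--     # Un objeto comienza con '{' y termina con '}'
--     if index < len(tokens) and tokens[index][0] == 'LBRACE':
--         index += 1
--         is_valid, index = parse_pares(tokens, index)
--         if is_valid and index < len(tokens) and tokens[index][0] == 'RBRACE':
--             index += 1
--             return True, index
--     return False, index
--
-- def parse_pares(tokens, index):
--     # Los pares pueden ser uno o más, separados por comas
--     if index < len(tokens):
--         is_valid, index = parse_par(tokens, index)
--         if not is_valid: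
--             return False, index
--         while index < len(tokens) and tokens[index][0] == 'COMMA':
--             index += 1
--             is_valid, index = parse_par(tokens, index)
--             if not is_valid:
--                 return False, index
--         return True, index
--     return False, index
--
-- def parse_par(tokens, index):
--     # Un par consta de una clave seguida de un colon y un valor
--     is_valid, index = parse_clave(tokens, index)
--     if is_valid and index < len(tokens) and tokens[index][0] == 'COLON':
--         index += 1
--         return parse_valor(tokens, index)
--     return False, index
--
-- def parse_clave(tokens, index):
--     # Una clave debe ser una cadena
--     if index < len(tokens) and tokens[index][0] == 'STRING':
--         index += 1
--         return True, index
--     return False, index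
--
-- def parse_valor(tokens, index):
--     # Un valor puede ser: cadena, número, objeto, true, false o null
--     if index < len(tokens):
--         token = tokens[index]
--         if token[0] == 'STRING':  # Es una cadena
--             index += 1
--         elif token[0] == 'NUMBER':  # Es un número
--             index += 1
--         elif token[0] == 'LBRACE':  # Es un objeto
--             is_valid, index = parse_objeto(tokens, index)
--         elif token[0] == 'TRUE':  # Es true
--             index += 1
--         elif token[0] == 'FALSE':  # Es false
--             index += 1
--         elif token[0] == 'NULL':  # Es null
--             index += 1
--         else:
--             return False, index
--         return True, index
--     return False, index
-- ===== SOURCE B (Python) =====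
-- def parse_pares(tokens, index):
--     # Iterative recursive-descent parser flattened into one loop: a depth
--     # counter tracks how many objects are open, need_pair says whether the
--     # next thing to read is a key:value pair or a separator/closer.
--     n = len(tokens)
--     depth = 0
--     need_pair = True
--     while True:
--         if need_pair:
--             if not (index < n and tokens[index][0] == 'STRING'):
--                 return False, index
--             index += 1
--             if not (index < n and tokens[index][0] == 'COLON'):
--                 return False, index
--             index += 1
--             if index >= n:
--                 return False, index
--             kind = tokens[index][0]
--             if kind == 'LBRACE':
--                 index += 1
--                 depth += 1
--                 continue
--             if kind not in ('STRING', 'NUMBER', 'TRUE', 'FALSE', 'NULL'):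
--                 return False, index
--             index += 1
--             need_pair = False
--         else:
--             if index < n and tokens[index][0] == 'COMMA':
--                 index += 1
--                 need_pair = True
--             elif depth > 0:
--                 if not (index < n and tokens[index][0] == 'RBRACE'):
--                     return False, index
--                 index += 1
--                 depth -= 1
--             else:
--                 return True, index
-- ===== Notes on version B (the rewrite author's own statement) =====
-- stated objective: alternative
-- what changed: Replaced the four mutually recursive parser functions by a single iterative loop with an explicit nesting-depth counter, propagating a failure inside a nested object instead of reproducing A's swallowing of it; Pre_ excludes index < -len(tokens), where A raises IndexError.
-- intended difference: On token streams whose parse reaches a nested object that is malformed or never closed by RBRACE, A still reports the whole input valid (parse_valor discards parse_objeto's validity flag), e.g. returning (True, 6) on a pair whose object value is unclosed, while B returns (False, index-at-the-defect); propagating the inner failure is the intended behaviour of a parser. — e.g. on parse_pares([("STRING", "a"), ("COLON", ":"), ("LBRACE", "{"), ("STRING", "b"), ("COLON", ":"), ("NUMBER", "1")], 0): A returns (true, 6), B returns (false, 6)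
import Mathlib
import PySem

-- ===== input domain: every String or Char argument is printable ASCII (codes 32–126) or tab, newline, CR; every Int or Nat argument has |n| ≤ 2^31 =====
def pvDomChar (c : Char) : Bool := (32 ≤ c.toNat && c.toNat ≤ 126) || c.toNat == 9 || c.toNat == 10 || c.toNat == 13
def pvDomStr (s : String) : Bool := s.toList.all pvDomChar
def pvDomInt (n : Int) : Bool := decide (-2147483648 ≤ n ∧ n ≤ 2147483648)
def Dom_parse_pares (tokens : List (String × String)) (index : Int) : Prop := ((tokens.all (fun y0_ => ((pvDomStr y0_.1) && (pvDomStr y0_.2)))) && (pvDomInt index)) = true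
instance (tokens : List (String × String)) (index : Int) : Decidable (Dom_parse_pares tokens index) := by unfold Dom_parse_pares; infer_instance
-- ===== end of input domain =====

-- B replaces A's four mutually recursive parser functions by one iterative
-- loop with an explicit nesting-depth counter, and propagates a failure inside
-- a nested object (objective: alternative; intended difference stated at D_).

-- ===== PORT A =====
-- tokens[i][0] under Python indexing (negative indices wrap; none = IndexError)
def tokKind (tokens : List (String × String)) (i : Int) : Option String :=
  (PySem.List.pyGet? tokens i).map Prod.fst

-- parse_clave (non-recursive, so defined outside the mutual block)
def parse_claveA (tokens : List (String × String)) (i : Int) : Bool × Int :=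
  if i < (tokens.length : Int) ∧ tokKind tokens i = some "STRING" then (true, i + 1)
  else (false, i)

-- Small named arithmetic lemmas: the recursive definitions below cite these by
-- name so that no tactic-generated proof term is embedded in a definition body.
theorem pvLt1 (i : Int) : i < i + 1 := lt_add_one i
theorem pvLt3 (i : Int) : i < i + 3 := lt_add_of_pos_right i (by decide)
theorem pvLt11 (i : Int) : i < i + 1 + 1 := (pvLt1 i).trans (pvLt1 (i + 1))
theorem pvLt111 (j : Int) : j < j + 1 + 1 + 1 := (pvLt11 j).trans (pvLt1 (j + 1 + 1))
theorem pvLtSucc {i c2 : Int} (h : c2 = i + 1) : i < c2 + 1 := h ▸ pvLt11 i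
theorem pvToNatLt {n i j : Int} (hin : i < n) (hij : i < j) :
    (n - j).toNat < (n - i).toNat :=
  (Int.toNat_lt_toNat (Int.sub_pos.mpr hin)).mpr (sub_lt_sub_left hij n)

-- the two facts about parse_clave the mutual block's termination proof cites
theorem parse_claveA_le (tokens : List (String × String)) (i : Int) :
    i ≤ (parse_claveA tokens i).2 := by
  unfold parse_claveA
  split_ifs
  · exact (pvLt1 i).le
  · exact le_refl i

theorem parse_claveA_true (tokens : List (String × String)) (i : Int)
    (h : (parse_claveA tokens i).1 = true) :
    (i < (tokens.length : Int) ∧ tokKind tokens i = some "STRING") ∧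
      (parse_claveA tokens i).2 = i + 1 := by
  revert h
  unfold parse_claveA
  split_ifs with hc
  · exact fun _ => ⟨hc, rfl⟩
  · exact fun hh => nomatch hh

-- The mutual recursion of A, transliterated.  The five mutually recursive
-- pieces (parse_pares entry, its while-COMMA loop, parse_par, parse_valor,
-- parse_objeto) are packed into one definition over an explicit call tag --
-- the same packing Lean performs for a mutual block -- and each returns its
-- Bool x Int result bundled with the bound "the index never moves backwards"
-- (plus, for the par tag, strict progress on success), which is exactly what
-- the well-founded termination argument needs.
inductive pvACall
  | pares     -- parse_pares: guard, first pair, then the while loop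
  | paresLoop -- the 'while tokens[index][0] == COMMA' loop of parse_pares
  | par       -- parse_par: clave, COLON, valor
  | valor     -- parse_valor: elif chain STRING, NUMBER, LBRACE, TRUE, FALSE, NULL
  | objeto    -- parse_objeto: LBRACE, inner pares, RBRACE

def pvARank : pvACall → Nat
  | .pares => 3
  | .paresLoop => 0
  | .par => 2
  | .valor => 1
  | .objeto => 0

def pvAStep (tokens : List (String × String)) (c : pvACall) (i : Int) :
    {r : Bool × Int // i ≤ r.2 ∧
      (c = pvACall.par → r.1 = true → i < (tokens.length : Int) ∧ i + 1 + 1 ≤ r.2)} :=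
  match c with
  | .pares =>
    if h : i < (tokens.length : Int) then
      match pvAStep tokens .par i with
      | ⟨p, hp⟩ =>
        if hv : p.1 = true then
          match pvAStep tokens .paresLoop p.2 with
          | ⟨q, hq⟩ => ⟨q, ⟨le_trans hp.1 hq.1, fun hc => nomatch hc⟩⟩
        else ⟨(false, p.2), ⟨hp.1, fun hc => nomatch hc⟩⟩
    else ⟨(false, i), ⟨le_refl i, fun hc => nomatch hc⟩⟩
  | .paresLoop =>
    if h : i < (tokens.length : Int) ∧ tokKind tokens i = some "COMMA" then
      match pvAStep tokens .par (i + 1) with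
      | ⟨p, hp⟩ =>
        if hv : p.1 = true then
          match pvAStep tokens .paresLoop p.2 with
          | ⟨q, hq⟩ => ⟨q, ⟨le_trans (le_trans (pvLt1 i).le hp.1) hq.1, fun hc => nomatch hc⟩⟩
        else ⟨(false, p.2), ⟨le_trans (pvLt1 i).le hp.1, fun hc => nomatch hc⟩⟩
    else ⟨(true, i), ⟨le_refl i, fun hc => nomatch hc⟩⟩
  | .par =>
    if h : (parse_claveA tokens i).1 = true ∧
        (parse_claveA tokens i).2 < (tokens.length : Int) ∧
        tokKind tokens (parse_claveA tokens i).2 = some "COLON" then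
      match pvAStep tokens .valor ((parse_claveA tokens i).2 + 1) with
      | ⟨v, hv⟩ =>
        ⟨v, ⟨le_trans (pvLt11 i).le ((parse_claveA_true tokens i h.1).2 ▸ hv.1),
          fun _ _ => ⟨(parse_claveA_true tokens i h.1).1.1,
            (parse_claveA_true tokens i h.1).2 ▸ hv.1⟩⟩⟩
    else
      ⟨(false, (parse_claveA tokens i).2),
        ⟨parse_claveA_le tokens i, fun _ hh => nomatch hh⟩⟩
  | .valor =>
    if h : i < (tokens.length : Int) then
      if tokKind tokens i = some "STRING" then ⟨(true, i + 1), ⟨(pvLt1 i).le, fun hc => nomatch hc⟩⟩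
      else if tokKind tokens i = some "NUMBER" then ⟨(true, i + 1), ⟨(pvLt1 i).le, fun hc => nomatch hc⟩⟩
      else if tokKind tokens i = some "LBRACE" then
        -- parse_objeto's validity flag is discarded; only its index is kept (as in A)
        match pvAStep tokens .objeto i with
        | ⟨o, ho⟩ => ⟨(true, o.2), ⟨ho.1, fun hc => nomatch hc⟩⟩
      else if tokKind tokens i = some "TRUE" then ⟨(true, i + 1), ⟨(pvLt1 i).le, fun hc => nomatch hc⟩⟩
      else if tokKind tokens i = some "FALSE" then ⟨(true, i + 1), ⟨(pvLt1 i).le, fun hc => nomatch hc⟩⟩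
      else if tokKind tokens i = some "NULL" then ⟨(true, i + 1), ⟨(pvLt1 i).le, fun hc => nomatch hc⟩⟩
      else ⟨(false, i), ⟨le_refl i, fun hc => nomatch hc⟩⟩
    else ⟨(false, i), ⟨le_refl i, fun hc => nomatch hc⟩⟩
  | .objeto =>
    if h : i < (tokens.length : Int) ∧ tokKind tokens i = some "LBRACE" then
      match pvAStep tokens .pares (i + 1) with
      | ⟨p, hp⟩ =>
        if h2 : p.1 = true ∧ p.2 < (tokens.length : Int) ∧ tokKind tokens p.2 = some "RBRACE" then
          ⟨(true, p.2 + 1), ⟨le_trans (le_trans (pvLt1 i).le hp.1) (pvLt1 p.2).le, fun hc => nomatch hc⟩⟩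
        else ⟨(false, p.2), ⟨le_trans (pvLt1 i).le hp.1, fun hc => nomatch hc⟩⟩
    else ⟨(false, i), ⟨le_refl i, fun hc => nomatch hc⟩⟩
termination_by (((tokens.length : Int) - i).toNat, pvARank c)
decreasing_by
  · exact Prod.Lex.right _ (by decide)
  · exact Prod.Lex.left _ _ (pvToNatLt h (lt_of_lt_of_le (pvLt11 i) (hp.2 rfl hv).2))
  · exact Prod.Lex.left _ _ (pvToNatLt h.1 (pvLt1 i))
  · exact Prod.Lex.left _ _ (pvToNatLt h.1 (lt_of_lt_of_le (pvLt111 i) (hp.2 rfl hv).2))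
  · exact Prod.Lex.left _ _ (pvToNatLt (parse_claveA_true tokens i h.1).1.1
      (pvLtSucc (parse_claveA_true tokens i h.1).2))
  · exact Prod.Lex.right _ (by decide)
  · exact Prod.Lex.left _ _ (pvToNatLt h.1 (pvLt1 i))

def parse_pares (tokens : List (String × String)) (index : Int) : Bool × Int :=
  (pvAStep tokens pvACall.pares index).val

-- ===== PORT B =====
-- Source B: one while loop over (need_pair, index, depth); the loop becomes one
-- tail-recursive function on the same state.
def pvBStep (tokens : List (String × String)) (needPair : Bool) (i : Int) (d : Nat) : Bool × Int :=
  match needPair with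
  | true =>
    if h1 : i < (tokens.length : Int) ∧ tokKind tokens i = some "STRING" then
      if h2 : i + 1 < (tokens.length : Int) ∧ tokKind tokens (i + 1) = some "COLON" then
        if h3 : i + 2 < (tokens.length : Int) then
          if tokKind tokens (i + 2) = some "LBRACE" then
            pvBStep tokens true (i + 3) (d + 1)          -- open an object
          else if tokKind tokens (i + 2) = some "STRING" ∨ tokKind tokens (i + 2) = some "NUMBER" ∨
                  tokKind tokens (i + 2) = some "TRUE" ∨ tokKind tokens (i + 2) = some "FALSE" ∨
                  tokKind tokens (i + 2) = some "NULL" then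
            pvBStep tokens false (i + 3) d
          else (false, i + 2)
        else (false, i + 2)
      else (false, i + 1)
    else (false, i)
  | false =>
    if h : i < (tokens.length : Int) ∧ tokKind tokens i = some "COMMA" then
      pvBStep tokens true (i + 1) d
    else if 0 < d then
      if h2 : i < (tokens.length : Int) ∧ tokKind tokens i = some "RBRACE" then
        pvBStep tokens false (i + 1) (d - 1)             -- close an object
      else (false, i)
    else (true, i)
termination_by ((tokens.length : Int) - i).toNat
decreasing_by
  · exact pvToNatLt h1.1 (pvLt3 i)
  · exact pvToNatLt h1.1 (pvLt3 i)
  · exact pvToNatLt h.1 (pvLt1 i)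
  · exact pvToNatLt h2.1 (pvLt1 i)

def parse_pares_alt (tokens : List (String × String)) (index : Int) : Bool × Int :=
  pvBStep tokens true index 0

-- ===== PRECONDITION & SPEC =====
-- Pre_ excludes exactly the inputs on which Python raises IndexError: an index
-- below -len(tokens) reaches tokens[index] (guarded only by index < len) in
-- both A and B.  Neither raises otherwise (indices only grow).
def Pre_parse_pares (tokens : List (String × String)) (index : Int) : Prop :=
  -(tokens.length : Int) ≤ index
instance (tokens : List (String × String)) (index : Int) : Decidable (Pre_parse_pares tokens index) := by unfold Pre_parse_pares; infer_instance

def pvWitness_parse_pares : (List (String × String)) × Int :=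
  ([("STRING", "a"), ("COLON", ":"), ("NUMBER", "1")], 0)

-- The token stream a run starting at `index` actually reads: for a negative
-- in-range start Python's tokens[index] wraps to the end of the list and the
-- increasing index then re-enters the list at 0.
def pvStream (tokens : List (String × String)) (i : Int) : List (String × String) :=
  if i < 0 then tokens.drop ((tokens.length : Int) + i).toNat ++ tokens
  else tokens.drop i.toNat

-- Does a strict grammar walk over the stream (pair = STRING COLON value,
-- pairs separated by COMMA, an object closed by RBRACE) get stuck while at
-- least one object is still open?  Phases: 0 key, 1 colon, 2 value, 3 after.
def pvStuck : List (String × String) → Nat → Nat → Bool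
  | [], _, d => decide (0 < d)
  | t :: ts, 0, d => if t.1 = "STRING" then pvStuck ts 1 d else decide (0 < d)
  | t :: ts, 1, d => if t.1 = "COLON" then pvStuck ts 2 d else decide (0 < d)
  | t :: ts, 2, d =>
      if t.1 = "LBRACE" then pvStuck ts 0 (d + 1)
      else if t.1 ∈ ["STRING", "NUMBER", "TRUE", "FALSE", "NULL"] then pvStuck ts 3 d
      else decide (0 < d)
  | t :: ts, _, d =>
      if t.1 = "COMMA" then pvStuck ts 0 d
      else if t.1 = "RBRACE" ∧ 0 < d then pvStuck ts 3 (d - 1)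
      else decide (0 < d)

-- On token streams whose parse reaches a nested object that is malformed or
-- never closed by RBRACE, A still reports the input valid (parse_valor
-- discards parse_objeto's validity flag) while B returns (false, index at the
-- defect); propagating the inner failure is the intended behaviour of a parser.
def D_parse_pares (tokens : List (String × String)) (index : Int) : Prop :=
  pvStuck (pvStream tokens index) (0 : Nat) 0 = true
instance (tokens : List (String × String)) (index : Int) : Decidable (D_parse_pares tokens index) := by unfold D_parse_pares; infer_instance

def Spec_parse_pares (tokens : List (String × String)) (index : Int) (out : Bool × Int) : Prop := ¬ D_parse_pares tokens index → out = parse_pares_alt tokens index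
instance (tokens : List (String × String)) (index : Int) (out : Bool × Int) : Decidable (Spec_parse_pares tokens index out) := by unfold Spec_parse_pares; infer_instance

def pvDiffWitness_parse_pares : (List (String × String)) × Int :=
  ([("STRING", "a"), ("COLON", ":"), ("LBRACE", "{"), ("STRING", "b"), ("COLON", ":"), ("NUMBER", "1")], 0)

def pvDiffWitnessOut_parse_pares : (Bool × Int) × (Bool × Int) := ((true, 6), (false, 6))

-- ===== CLAIM (what is proved, stated in full; the proofs are below) =====
def Claim_unchanged_parse_pares : Prop := ∀ (tokens : List (String × String)) (index : Int), Dom_parse_pares tokens index → Pre_parse_pares tokens index → Spec_parse_pares tokens index (parse_pares tokens index)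
def Claim_changed_parse_pares : Prop := Dom_parse_pares (pvDiffWitness_parse_pares.1) (pvDiffWitness_parse_pares.2) ∧ Pre_parse_pares (pvDiffWitness_parse_pares.1) (pvDiffWitness_parse_pares.2) ∧ D_parse_pares (pvDiffWitness_parse_pares.1) (pvDiffWitness_parse_pares.2) ∧ parse_pares (pvDiffWitness_parse_pares.1) (pvDiffWitness_parse_pares.2) = pvDiffWitnessOut_parse_pares.1 ∧ parse_pares_alt (pvDiffWitness_parse_pares.1) (pvDiffWitness_parse_pares.2) = pvDiffWitnessOut_parse_pares.2 ∧ pvDiffWitnessOut_parse_pares.1 ≠ pvDiffWitnessOut_parse_pares.2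
def Claim_exact_parse_pares : Prop := ∀ (tokens : List (String × String)) (index : Int), Dom_parse_pares tokens index → Pre_parse_pares tokens index → D_parse_pares tokens index → parse_pares tokens index ≠ parse_pares_alt tokens index

-- ===== LEMMAS AND PROOFS =====

theorem pvA_le (tokens : List (String × String)) (c : pvACall) (i : Int) :
    i ≤ (pvAStep tokens c i).val.2 :=
  (pvAStep tokens c i).property.1

-- A-side unfolding equations --------------------------------------------------

theorem par_eq (tokens : List (String × String)) (i : Int) :
    (pvAStep tokens pvACall.par i).val =
      if i < (tokens.length : Int) ∧ tokKind tokens i = some "STRING" then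
        (if i + 1 < (tokens.length : Int) ∧ tokKind tokens (i + 1) = some "COLON" then
          (pvAStep tokens pvACall.valor (i + 2)).val
        else (false, i + 1))
      else (false, i) := by
  rw [pvAStep.eq_def]
  dsimp only
  split
  case isTrue h =>
    have hc := parse_claveA_true tokens i h.1
    rcases hV : pvAStep tokens pvACall.valor ((parse_claveA tokens i).2 + 1) with ⟨v, hv⟩
    have hval : (pvAStep tokens pvACall.valor ((parse_claveA tokens i).2 + 1)).val = v := by rw [hV]
    rw [if_pos hc.1]
    rw [if_pos ⟨by rw [← hc.2]; exact h.2.1, by rw [← hc.2]; exact h.2.2⟩]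
    have h3 : (parse_claveA tokens i).2 + 1 = i + 2 := by rw [hc.2]; ring
    rw [h3] at hval
    simpa using hval.symm
  case isFalse h =>
    by_cases hc : i < (tokens.length : Int) ∧ tokKind tokens i = some "STRING"
    · have h1 : parse_claveA tokens i = (true, i + 1) := by rw [parse_claveA, if_pos hc]
      have h2 : ¬ (i + 1 < (tokens.length : Int) ∧ tokKind tokens (i + 1) = some "COLON") := by
        intro hcol
        exact h (by rw [h1]; exact ⟨rfl, hcol.1, hcol.2⟩)
      rw [if_pos hc, if_neg h2]
      simp [h1]
    · have h1 : parse_claveA tokens i = (false, i) := by rw [parse_claveA, if_neg hc]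
      rw [if_neg hc]
      simp [h1]

theorem par_ge (tokens : List (String × String)) (i : Int)
    (h : ¬ i < (tokens.length : Int)) : (pvAStep tokens pvACall.par i).val = (false, i) := by
  rw [par_eq]
  have : ¬ (i < (tokens.length : Int) ∧ tokKind tokens i = some "STRING") := fun hx => h hx.1
  rw [if_neg this]

theorem pares_eq (tokens : List (String × String)) (i : Int) :
    (pvAStep tokens pvACall.pares i).val =
      (if (pvAStep tokens pvACall.par i).val.1 = true then (pvAStep tokens pvACall.paresLoop (pvAStep tokens pvACall.par i).val.2).val
       else (false, (pvAStep tokens pvACall.par i).val.2)) := by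
  rw [pvAStep.eq_def]
  dsimp only
  by_cases h : i < (tokens.length : Int)
  · rw [dif_pos h]
    rcases hE : pvAStep tokens pvACall.par i with ⟨p, hp⟩
    dsimp only
    by_cases hv : p.1 = true
    · rw [dif_pos hv, if_pos hv]
    · rw [dif_neg hv, if_neg hv]
  · rw [dif_neg h, par_ge tokens i h]
    simp

theorem paresLoop_eq (tokens : List (String × String)) (j : Int) :
    (pvAStep tokens pvACall.paresLoop j).val =
      if j < (tokens.length : Int) ∧ tokKind tokens j = some "COMMA" then
        (pvAStep tokens pvACall.pares (j + 1)).val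
      else (true, j) := by
  rw [pvAStep.eq_def]
  dsimp only
  by_cases h : j < (tokens.length : Int) ∧ tokKind tokens j = some "COMMA"
  · rw [dif_pos h, if_pos h, pares_eq]
    rcases hE : pvAStep tokens pvACall.par (j + 1) with ⟨p, hp⟩
    dsimp only
    by_cases hv : p.1 = true
    · rw [dif_pos hv, if_pos hv]
    · rw [dif_neg hv, if_neg hv]
  · rw [dif_neg h, if_neg h]

-- the index an accepted value ends at after A's parse_objeto swallows the
-- inner result (RBRACE consumed only after a valid inner pair list)
def adjustA (tokens : List (String × String)) (r : Bool × Int) : Int :=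
  if r.1 = true ∧ r.2 < (tokens.length : Int) ∧ tokKind tokens r.2 = some "RBRACE" then r.2 + 1
  else r.2

theorem objeto_snd (tokens : List (String × String)) (i : Int)
    (h1 : i < (tokens.length : Int)) (h2 : tokKind tokens i = some "LBRACE") :
    (pvAStep tokens pvACall.objeto i).val.2 = adjustA tokens (pvAStep tokens pvACall.pares (i + 1)).val := by
  rw [pvAStep.eq_def]
  dsimp only
  rw [dif_pos ⟨h1, h2⟩]
  rcases hE : pvAStep tokens pvACall.pares (i + 1) with ⟨p, hp⟩
  dsimp only
  unfold adjustA
  by_cases hb : p.1 = true ∧ p.2 < (tokens.length : Int) ∧ tokKind tokens p.2 = some "RBRACE"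
  · rw [dif_pos hb, if_pos hb]
  · rw [dif_neg hb, if_neg hb]

theorem valor_eq (tokens : List (String × String)) (i : Int) :
    (pvAStep tokens pvACall.valor i).val =
      if i < (tokens.length : Int) then
        (if tokKind tokens i = some "STRING" then (true, i + 1)
         else if tokKind tokens i = some "NUMBER" then (true, i + 1)
         else if tokKind tokens i = some "LBRACE" then (true, (pvAStep tokens pvACall.objeto i).val.2)
         else if tokKind tokens i = some "TRUE" then (true, i + 1)
         else if tokKind tokens i = some "FALSE" then (true, i + 1)
         else if tokKind tokens i = some "NULL" then (true, i + 1)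
         else (false, i))
      else (false, i) := by
  rw [pvAStep.eq_def]
  dsimp only
  by_cases h : i < (tokens.length : Int)
  · rw [dif_pos h, if_pos h]
    by_cases hS : tokKind tokens i = some "STRING"
    · rw [if_pos hS, if_pos hS]
    rw [if_neg hS, if_neg hS]
    by_cases hN : tokKind tokens i = some "NUMBER"
    · rw [if_pos hN, if_pos hN]
    rw [if_neg hN, if_neg hN]
    by_cases hL : tokKind tokens i = some "LBRACE"
    · rw [if_pos hL, if_pos hL]
    · rw [if_neg hL, if_neg hL]
      split_ifs <;> rfl
  · rw [dif_neg h, if_neg h]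

-- A's parse_pares result seen from a pending stack of d open objects
def unwindA (tokens : List (String × String)) : Nat → Bool × Int → Bool × Int
  | 0, r => r
  | d + 1, r => unwindA tokens d (pvAStep tokens pvACall.paresLoop (adjustA tokens r)).val

theorem adjust_ge (tokens : List (String × String)) (r : Bool × Int) :
    r.2 ≤ adjustA tokens r := by
  unfold adjustA
  split_ifs
  · exact (pvLt1 r.2).le
  · exact le_refl _

theorem adjust_false (tokens : List (String × String)) (j : Int) :
    adjustA tokens (false, j) = j := by
  unfold adjustA
  rw [if_neg]
  rintro ⟨h, -⟩
  exact Bool.false_ne_true h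

theorem loopInv (tokens : List (String × String)) (j : Int) :
    (pvAStep tokens pvACall.paresLoop j).val.1 = true ∨ j < (pvAStep tokens pvACall.paresLoop j).val.2 := by
  rw [paresLoop_eq]
  split_ifs with h
  · exact Or.inr (lt_of_lt_of_le (pvLt1 j) (pvA_le tokens pvACall.pares (j + 1)))
  · exact Or.inl rfl

theorem unwindNe (tokens : List (String × String)) :
    ∀ (e : Nat) (r : Bool × Int) (m : Int),
      ((r.1 = true ∧ m ≤ r.2) ∨ (r.1 = false ∧ m < r.2)) →
      (unwindA tokens e r).1 = true ∨ m < (unwindA tokens e r).2 := by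
  intro e
  induction e with
  | zero =>
    rintro r m (⟨h1, _⟩ | ⟨_, h2⟩)
    · exact Or.inl h1
    · exact Or.inr h2
  | succ e IH =>
    intro r m h
    have ham : m ≤ adjustA tokens r := by
      rcases h with ⟨_, h2⟩ | ⟨_, h2⟩
      · exact le_trans h2 (adjust_ge tokens r)
      · exact le_trans h2.le (adjust_ge tokens r)
    rw [unwindA]
    apply IH
    rcases loopInv tokens (adjustA tokens r) with hT | hLt
    · exact Or.inl ⟨hT, le_trans ham (pvA_le tokens pvACall.paresLoop _)⟩
    · by_cases hb : (pvAStep tokens pvACall.paresLoop (adjustA tokens r)).val.1 = true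
      · exact Or.inl ⟨hb, le_of_lt (lt_of_le_of_lt ham hLt)⟩
      · exact Or.inr ⟨Bool.not_eq_true _ ▸ Bool.eq_false_iff.mpr hb, lt_of_le_of_lt ham hLt⟩

-- the disagreement a swallowed failure produces: A's unwound result is never
-- (false, j) again
theorem pvUnwindFalse (tokens : List (String × String)) (e : Nat) (j : Int) :
    (unwindA tokens (e + 1) (false, j)).1 = true ∨ j < (unwindA tokens (e + 1) (false, j)).2 := by
  rw [unwindA, adjust_false]
  apply unwindNe
  rcases loopInv tokens j with hT | hLt
  · exact Or.inl ⟨hT, pvA_le tokens pvACall.paresLoop j⟩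
  · by_cases hb : (pvAStep tokens pvACall.paresLoop j).val.1 = true
    · exact Or.inl ⟨hb, (pvA_le tokens pvACall.paresLoop j)⟩
    · exact Or.inr ⟨Bool.eq_false_iff.mpr hb, hLt⟩

theorem unwind_stall (tokens : List (String × String)) (i : Int)
    (h1 : ¬ (i < (tokens.length : Int) ∧ tokKind tokens i = some "COMMA"))
    (h2 : ¬ (i < (tokens.length : Int) ∧ tokKind tokens i = some "RBRACE")) :
    ∀ e : Nat, unwindA tokens e (true, i) = (true, i) := by
  intro e
  induction e with
  | zero => rfl
  | succ e IH =>
    rw [unwindA]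
    have ha : adjustA tokens (true, i) = i := by
      unfold adjustA
      rw [if_neg]
      rintro ⟨-, hc⟩
      exact h2 hc
    rw [ha, paresLoop_eq, if_neg h1]
    exact IH

-- stream lemmas ---------------------------------------------------------------

theorem stream_nil (tokens : List (String × String)) (i : Int)
    (h : (tokens.length : Int) ≤ i) : pvStream tokens i = [] := by
  unfold pvStream
  rw [if_neg (by omega)]
  exact List.drop_eq_nil_of_le (by omega)

theorem stream_cons (tokens : List (String × String)) (i : Int)
    (h0 : -(tokens.length : Int) ≤ i) (h1 : i < (tokens.length : Int)) :
    ∃ p, PySem.List.pyGet? tokens i = some p ∧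
      pvStream tokens i = p :: pvStream tokens (i + 1) := by
  unfold pvStream
  by_cases hi : i < 0
  · rw [if_pos hi]
    have hklt : ((tokens.length : Int) + i).toNat < tokens.length := by omega
    refine ⟨tokens[((tokens.length : Int) + i).toNat], ?_, ?_⟩
    · have h2 : ¬ (0 ≤ i) := by omega
      have h3 : tokens.length - (-i).toNat = ((tokens.length : Int) + i).toNat := by omega
      simp [PySem.List.pyGet?, PySem.List.pyIdx?, h2, h0, h3, List.getElem?_eq_getElem hklt]
    · rw [List.drop_eq_getElem_cons hklt]
      by_cases hi1 : i + 1 < 0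
      · rw [if_pos hi1]
        have he : ((tokens.length : Int) + (i + 1)).toNat = ((tokens.length : Int) + i).toNat + 1 := by
          omega
        rw [he, List.cons_append]
      · rw [if_neg hi1]
        have hi0 : i + 1 = 0 := by omega
        have hkl : ((tokens.length : Int) + i).toNat + 1 = tokens.length := by omega
        rw [List.cons_append, hi0, hkl]
        simp
  · rw [if_neg hi]
    have h0' : (0 : Int) ≤ i := by omega
    have hklt : i.toNat < tokens.length := by omega
    refine ⟨tokens[i.toNat], ?_, ?_⟩
    · simp [PySem.List.pyGet?, PySem.List.pyIdx?, h0', h1]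
    · rw [List.drop_eq_getElem_cons hklt, if_neg (by omega : ¬ i + 1 < 0)]
      have : (i + 1).toNat = i.toNat + 1 := by omega
      rw [this]

theorem tokKind_of_get {tokens : List (String × String)} {i : Int} {p : String × String}
    (hp : PySem.List.pyGet? tokens i = some p) : tokKind tokens i = some p.1 := by
  unfold tokKind
  rw [hp]
  rfl

theorem tokKind_iff {tokens : List (String × String)} {i : Int} {p : String × String}
    (hp : PySem.List.pyGet? tokens i = some p) (s : String) :
    tokKind tokens i = some s ↔ p.1 = s := by
  rw [tokKind_of_get hp]
  exact ⟨fun h => Option.some.inj h, fun h => by rw [h]⟩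

-- one unfolding equation per phase, phrased over the running integer index
theorem stuck_key_eq (tokens : List (String × String)) (d : Nat) (j : Int)
    (h0 : -(tokens.length : Int) ≤ j) :
    pvStuck (pvStream tokens j) (0 : Nat) d =
      if j < (tokens.length : Int) ∧ tokKind tokens j = some "STRING" then
        pvStuck (pvStream tokens (j + 1)) (1 : Nat) d
      else decide (0 < d) := by
  by_cases hl : j < (tokens.length : Int)
  · obtain ⟨p, hp, hs⟩ := stream_cons tokens j h0 hl
    rw [hs]
    by_cases hk : p.1 = "STRING"
    · rw [if_pos ⟨hl, (tokKind_iff hp _).mpr hk⟩]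
      simp [pvStuck, hk]
    · rw [if_neg (fun hc => hk ((tokKind_iff hp _).mp hc.2))]
      simp [pvStuck, hk]
  · rw [stream_nil tokens j (by omega), if_neg (fun hc => hl hc.1)]
    rfl

theorem stuck_colon_eq (tokens : List (String × String)) (d : Nat) (j : Int)
    (h0 : -(tokens.length : Int) ≤ j) :
    pvStuck (pvStream tokens j) (1 : Nat) d =
      if j < (tokens.length : Int) ∧ tokKind tokens j = some "COLON" then
        pvStuck (pvStream tokens (j + 1)) (2 : Nat) d
      else decide (0 < d) := by
  by_cases hl : j < (tokens.length : Int)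
  · obtain ⟨p, hp, hs⟩ := stream_cons tokens j h0 hl
    rw [hs]
    by_cases hk : p.1 = "COLON"
    · rw [if_pos ⟨hl, (tokKind_iff hp _).mpr hk⟩]
      simp [pvStuck, hk]
    · rw [if_neg (fun hc => hk ((tokKind_iff hp _).mp hc.2))]
      simp [pvStuck, hk]
  · rw [stream_nil tokens j (by omega), if_neg (fun hc => hl hc.1)]
    rfl

theorem stuck_val_eq (tokens : List (String × String)) (d : Nat) (j : Int)
    (h0 : -(tokens.length : Int) ≤ j) :
    pvStuck (pvStream tokens j) (2 : Nat) d =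
      if j < (tokens.length : Int) ∧ tokKind tokens j = some "LBRACE" then
        pvStuck (pvStream tokens (j + 1)) (0 : Nat) (d + 1)
      else if j < (tokens.length : Int) ∧
          (tokKind tokens j = some "STRING" ∨ tokKind tokens j = some "NUMBER" ∨
           tokKind tokens j = some "TRUE" ∨ tokKind tokens j = some "FALSE" ∨
           tokKind tokens j = some "NULL") then
        pvStuck (pvStream tokens (j + 1)) (3 : Nat) d
      else decide (0 < d) := by
  by_cases hl : j < (tokens.length : Int)
  · obtain ⟨p, hp, hs⟩ := stream_cons tokens j h0 hl
    rw [hs]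
    by_cases hk : p.1 = "LBRACE"
    · rw [if_pos ⟨hl, (tokKind_iff hp _).mpr hk⟩]
      simp [pvStuck, hk]
    · rw [if_neg (fun hc => hk ((tokKind_iff hp _).mp hc.2))]
      by_cases ho : p.1 = "STRING" ∨ p.1 = "NUMBER" ∨ p.1 = "TRUE" ∨ p.1 = "FALSE" ∨ p.1 = "NULL"
      · rw [if_pos ⟨hl, by
          rcases ho with h | h | h | h | h
          · exact Or.inl ((tokKind_iff hp _).mpr h)
          · exact Or.inr (Or.inl ((tokKind_iff hp _).mpr h))
          · exact Or.inr (Or.inr (Or.inl ((tokKind_iff hp _).mpr h)))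
          · exact Or.inr (Or.inr (Or.inr (Or.inl ((tokKind_iff hp _).mpr h))))
          · exact Or.inr (Or.inr (Or.inr (Or.inr ((tokKind_iff hp _).mpr h))))⟩]
        simp [pvStuck, hk, ho]
      · rw [if_neg (fun hc => ho (by
          rcases hc.2 with h | h | h | h | h
          · exact Or.inl ((tokKind_iff hp _).mp h)
          · exact Or.inr (Or.inl ((tokKind_iff hp _).mp h))
          · exact Or.inr (Or.inr (Or.inl ((tokKind_iff hp _).mp h)))
          · exact Or.inr (Or.inr (Or.inr (Or.inl ((tokKind_iff hp _).mp h))))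
          · exact Or.inr (Or.inr (Or.inr (Or.inr ((tokKind_iff hp _).mp h))))))]
        simp only [pvStuck, if_neg hk]
        rw [if_neg (by simpa using ho)]
  · rw [stream_nil tokens j (by omega), if_neg (fun hc => hl hc.1),
      if_neg (fun hc => hl hc.1)]
    rfl

theorem stuck_after_eq (tokens : List (String × String)) (d : Nat) (j : Int)
    (h0 : -(tokens.length : Int) ≤ j) :
    pvStuck (pvStream tokens j) (3 : Nat) d =
      if j < (tokens.length : Int) ∧ tokKind tokens j = some "COMMA" then
        pvStuck (pvStream tokens (j + 1)) (0 : Nat) d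
      else if (j < (tokens.length : Int) ∧ tokKind tokens j = some "RBRACE") ∧ 0 < d then
        pvStuck (pvStream tokens (j + 1)) (3 : Nat) (d - 1)
      else decide (0 < d) := by
  by_cases hl : j < (tokens.length : Int)
  · obtain ⟨p, hp, hs⟩ := stream_cons tokens j h0 hl
    rw [hs]
    by_cases hk : p.1 = "COMMA"
    · rw [if_pos ⟨hl, (tokKind_iff hp _).mpr hk⟩]
      simp [pvStuck, hk]
    · rw [if_neg (fun hc => hk ((tokKind_iff hp _).mp hc.2))]
      by_cases hr : p.1 = "RBRACE" ∧ 0 < d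
      · rw [if_pos ⟨⟨hl, (tokKind_iff hp _).mpr hr.1⟩, hr.2⟩]
        simp only [pvStuck, if_neg hk, if_pos hr]
      · rw [if_neg (fun hc => hr ⟨(tokKind_iff hp _).mp hc.1.2, hc.2⟩)]
        simp only [pvStuck, if_neg hk, if_neg hr]
  · rw [stream_nil tokens j (by omega), if_neg (fun hc => hl hc.1),
      if_neg (fun hc => hl hc.1.1)]
    rfl

-- the diff witness's token list, named for the value computation below
def pvWlit : List (String × String) :=
  [("STRING", "a"), ("COLON", ":"), ("LBRACE", "{"), ("STRING", "b"), ("COLON", ":"), ("NUMBER", "1")]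

-- a failure leaf: both claims for a state that already returned (false, j)
theorem pvLeaf (tokens : List (String × String)) (d : Nat) (j : Int) :
    (decide (0 < d) = false → ((false, j) : Bool × Int) = unwindA tokens d (false, j)) ∧
    (decide (0 < d) = true → (((false, j) : Bool × Int).1 = false ∧
      ((unwindA tokens d (false, j)).1 = true ∨
        (((false, j) : Bool × Int)).2 < (unwindA tokens d (false, j)).2))) := by
  constructor
  · intro h
    have hd0 : d = 0 := by simpa using h
    subst hd0
    rfl
  · intro h
    have hd : 0 < d := by simpa using h
    obtain ⟨e, rfl⟩ : ∃ e, d = e + 1 := ⟨d - 1, by omega⟩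
    exact ⟨rfl, pvUnwindFalse tokens e j⟩

-- main simulation -------------------------------------------------------------
-- the statement proved for every state of B's loop
def pvSim4 (tokens : List (String × String)) (d : Nat) (i : Int) : Prop :=
  (pvStuck (pvStream tokens i) (0 : Nat) d = false →
    pvBStep tokens true i d = unwindA tokens d (pvAStep tokens pvACall.pares i).val) ∧
  (pvStuck (pvStream tokens i) (0 : Nat) d = true →
    (pvBStep tokens true i d).1 = false ∧
      ((unwindA tokens d (pvAStep tokens pvACall.pares i).val).1 = true ∨
        (pvBStep tokens true i d).2 < (unwindA tokens d (pvAStep tokens pvACall.pares i).val).2)) ∧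
  (pvStuck (pvStream tokens i) (3 : Nat) d = false →
    pvBStep tokens false i d = unwindA tokens d (pvAStep tokens pvACall.paresLoop i).val) ∧
  (pvStuck (pvStream tokens i) (3 : Nat) d = true →
    (pvBStep tokens false i d).1 = false ∧
      ((unwindA tokens d (pvAStep tokens pvACall.paresLoop i).val).1 = true ∨
        (pvBStep tokens false i d).2 < (unwindA tokens d (pvAStep tokens pvACall.paresLoop i).val).2))

theorem pvPairCase (tokens : List (String × String)) (d : Nat) (i : Int)
    (h0 : -(tokens.length : Int) ≤ i)
    (Hsmall : ∀ d' : Nat, ∀ i' : Int, -(tokens.length : Int) ≤ i' →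
      ((tokens.length : Int) - i').toNat < ((tokens.length : Int) - i).toNat →
      pvSim4 tokens d' i') :
    (pvStuck (pvStream tokens i) (0 : Nat) d = false →
      pvBStep tokens true i d = unwindA tokens d (pvAStep tokens pvACall.pares i).val) ∧
    (pvStuck (pvStream tokens i) (0 : Nat) d = true →
      (pvBStep tokens true i d).1 = false ∧
        ((unwindA tokens d (pvAStep tokens pvACall.pares i).val).1 = true ∨
          (pvBStep tokens true i d).2 < (unwindA tokens d (pvAStep tokens pvACall.pares i).val).2)) := by
  rw [pvBStep.eq_def]
  dsimp only
  rw [stuck_key_eq tokens d i h0]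
  by_cases c1 : i < (tokens.length : Int) ∧ tokKind tokens i = some "STRING"
  case neg =>
    rw [dif_neg c1, if_neg c1]
    have hA : (pvAStep tokens pvACall.pares i).val = (false, i) := by
      rw [pares_eq, par_eq, if_neg c1]
      simp
    rw [hA]
    exact pvLeaf tokens d i
  case pos =>
  rw [dif_pos c1, if_pos c1, stuck_colon_eq tokens d (i + 1) (by omega)]
  by_cases c2 : i + 1 < (tokens.length : Int) ∧ tokKind tokens (i + 1) = some "COLON"
  case neg =>
    rw [dif_neg c2, if_neg c2]
    have hA : (pvAStep tokens pvACall.pares i).val = (false, i + 1) := by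
      rw [pares_eq, par_eq, if_pos c1, if_neg c2]
      simp
    rw [hA]
    exact pvLeaf tokens d (i + 1)
  case pos =>
  rw [dif_pos c2, if_pos c2]
  have h12 : i + 1 + 1 = i + 2 := by ring
  simp only [h12]
  rw [stuck_val_eq tokens d (i + 2) (by omega)]
  have h23 : i + 2 + 1 = i + 3 := by ring
  simp only [h23]
  have hpar : (pvAStep tokens pvACall.par i).val = (pvAStep tokens pvACall.valor (i + 2)).val := by
    rw [par_eq, if_pos c1, if_pos c2]
  by_cases c3 : i + 2 < (tokens.length : Int)
  case neg =>
    rw [dif_neg c3, if_neg (fun hc => c3 hc.1), if_neg (fun hc => c3 hc.1)]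
    have hA : (pvAStep tokens pvACall.pares i).val = (false, i + 2) := by
      rw [pares_eq, hpar, valor_eq, if_neg c3]
      simp
    rw [hA]
    exact pvLeaf tokens d (i + 2)
  case pos =>
  rw [dif_pos c3]
  by_cases kL : tokKind tokens (i + 2) = some "LBRACE"
  case pos =>
    rw [if_pos kL, if_pos ⟨c3, kL⟩]
    have hval : (pvAStep tokens pvACall.valor (i + 2)).val =
        (true, adjustA tokens (pvAStep tokens pvACall.pares (i + 3)).val) := by
      rw [valor_eq, if_pos c3]
      rw [if_neg (by simp [kL]), if_neg (by simp [kL]), if_pos kL]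
      rw [objeto_snd tokens (i + 2) c3 kL, h23]
    have hpares : (pvAStep tokens pvACall.pares i).val =
        (pvAStep tokens pvACall.paresLoop (adjustA tokens (pvAStep tokens pvACall.pares (i + 3)).val)).val := by
      rw [pares_eq, hpar, hval]
      simp
    have hAeq : unwindA tokens d (pvAStep tokens pvACall.pares i).val =
        unwindA tokens (d + 1) (pvAStep tokens pvACall.pares (i + 3)).val := by
      rw [hpares]
      rfl
    rw [hAeq]
    have hM := Hsmall (d + 1) (i + 3) (by omega) (by omega)
    exact ⟨hM.1, hM.2.1⟩
  case neg =>
  rw [if_neg kL, if_neg (fun hc => kL hc.2)]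
  by_cases hOr : tokKind tokens (i + 2) = some "STRING" ∨ tokKind tokens (i + 2) = some "NUMBER" ∨
      tokKind tokens (i + 2) = some "TRUE" ∨ tokKind tokens (i + 2) = some "FALSE" ∨
      tokKind tokens (i + 2) = some "NULL"
  case pos =>
    rw [if_pos hOr, if_pos ⟨c3, hOr⟩]
    have hval : (pvAStep tokens pvACall.valor (i + 2)).val = (true, i + 3) := by
      rw [valor_eq, if_pos c3]
      rcases hOr with hk | hk | hk | hk | hk <;> simp [hk, h23]
    have hAeq : unwindA tokens d (pvAStep tokens pvACall.pares i).val =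
        unwindA tokens d (pvAStep tokens pvACall.paresLoop (i + 3)).val := by
      have hpares : (pvAStep tokens pvACall.pares i).val =
          (pvAStep tokens pvACall.paresLoop (i + 3)).val := by
        rw [pares_eq, hpar, hval]
        simp
      rw [hpares]
    rw [hAeq]
    have hM := Hsmall d (i + 3) (by omega) (by omega)
    exact ⟨hM.2.2.1, hM.2.2.2⟩
  case neg =>
    rw [if_neg hOr, if_neg (fun hc => hOr hc.2)]
    have hval : (pvAStep tokens pvACall.valor (i + 2)).val = (false, i + 2) := by
      rw [valor_eq, if_pos c3]
      simp only [not_or] at hOr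
      simp [kL, hOr.1, hOr.2.1, hOr.2.2.1, hOr.2.2.2.1, hOr.2.2.2.2]
    have hA : (pvAStep tokens pvACall.pares i).val = (false, i + 2) := by
      rw [pares_eq, hpar, hval]
      simp
    rw [hA]
    exact pvLeaf tokens d (i + 2)

theorem pvAfterCase (tokens : List (String × String)) (d : Nat) (i : Int)
    (h0 : -(tokens.length : Int) ≤ i)
    (Hsmall : ∀ d' : Nat, ∀ i' : Int, -(tokens.length : Int) ≤ i' →
      ((tokens.length : Int) - i').toNat < ((tokens.length : Int) - i).toNat →
      pvSim4 tokens d' i') :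
    (pvStuck (pvStream tokens i) (3 : Nat) d = false →
      pvBStep tokens false i d = unwindA tokens d (pvAStep tokens pvACall.paresLoop i).val) ∧
    (pvStuck (pvStream tokens i) (3 : Nat) d = true →
      (pvBStep tokens false i d).1 = false ∧
        ((unwindA tokens d (pvAStep tokens pvACall.paresLoop i).val).1 = true ∨
          (pvBStep tokens false i d).2 < (unwindA tokens d (pvAStep tokens pvACall.paresLoop i).val).2)) := by
  rw [pvBStep.eq_def]
  dsimp only
  rw [stuck_after_eq tokens d i h0]
  by_cases hC : i < (tokens.length : Int) ∧ tokKind tokens i = some "COMMA"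
  case pos =>
    rw [dif_pos hC, if_pos hC]
    have hAeq : unwindA tokens d (pvAStep tokens pvACall.paresLoop i).val =
        unwindA tokens d (pvAStep tokens pvACall.pares (i + 1)).val := by
      rw [paresLoop_eq, if_pos hC]
    rw [hAeq]
    have hM := Hsmall d (i + 1) (by omega) (by omega)
    exact ⟨hM.1, hM.2.1⟩
  case neg =>
  rw [dif_neg hC, if_neg hC]
  have hl : (pvAStep tokens pvACall.paresLoop i).val = (true, i) := by
    rw [paresLoop_eq, if_neg hC]
  rcases d with _ | e
  · rw [if_neg (lt_irrefl 0), if_neg (fun hc => (lt_irrefl 0) hc.2), hl]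
    constructor
    · intro _
      rfl
    · intro ht
      exact absurd ht (by decide)
  · rw [if_pos (Nat.succ_pos e)]
    by_cases hR : i < (tokens.length : Int) ∧ tokKind tokens i = some "RBRACE"
    case pos =>
      rw [dif_pos hR, if_pos ⟨hR, Nat.succ_pos e⟩]
      have hred : e + 1 - 1 = e := rfl
      rw [hred]
      have hadj : adjustA tokens ((true, i) : Bool × Int) = i + 1 := by
        unfold adjustA
        rw [if_pos ⟨rfl, hR.1, hR.2⟩]
      have hAeq : unwindA tokens (e + 1) (pvAStep tokens pvACall.paresLoop i).val =
          unwindA tokens e (pvAStep tokens pvACall.paresLoop (i + 1)).val := by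
        rw [hl]
        show unwindA tokens e (pvAStep tokens pvACall.paresLoop (adjustA tokens (true, i))).val = _
        rw [hadj]
      rw [hAeq]
      have hM := Hsmall e (i + 1) (by omega) (by omega)
      exact ⟨hM.2.2.1, hM.2.2.2⟩
    case neg =>
      rw [dif_neg hR, if_neg (fun hc => hR hc.1)]
      have hstall : unwindA tokens (e + 1) (pvAStep tokens pvACall.paresLoop i).val = (true, i) := by
        rw [hl]
        exact unwind_stall tokens i hC hR (e + 1)
      rw [hstall]
      constructor
      · intro hf
        exact absurd hf (by simp)
      · intro _
        exact ⟨rfl, Or.inl rfl⟩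

theorem pvBsim (tokens : List (String × String)) :
    ∀ t : Nat, ∀ d : Nat, ∀ i : Int, -(tokens.length : Int) ≤ i →
      ((tokens.length : Int) - i).toNat ≤ t →
      (pvStuck (pvStream tokens i) (0 : Nat) d = false →
        pvBStep tokens true i d = unwindA tokens d (pvAStep tokens pvACall.pares i).val) ∧
      (pvStuck (pvStream tokens i) (0 : Nat) d = true →
        (pvBStep tokens true i d).1 = false ∧
          ((unwindA tokens d (pvAStep tokens pvACall.pares i).val).1 = true ∨
            (pvBStep tokens true i d).2 < (unwindA tokens d (pvAStep tokens pvACall.pares i).val).2)) ∧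
      (pvStuck (pvStream tokens i) (3 : Nat) d = false →
        pvBStep tokens false i d = unwindA tokens d (pvAStep tokens pvACall.paresLoop i).val) ∧
      (pvStuck (pvStream tokens i) (3 : Nat) d = true →
        (pvBStep tokens false i d).1 = false ∧
          ((unwindA tokens d (pvAStep tokens pvACall.paresLoop i).val).1 = true ∨
            (pvBStep tokens false i d).2 < (unwindA tokens d (pvAStep tokens pvACall.paresLoop i).val).2)) := by
  intro t
  induction t using Nat.strong_induction_on with
  | _ t IH =>
    intro d i h0 ht
    have Hsmall : ∀ d' : Nat, ∀ i' : Int, -(tokens.length : Int) ≤ i' →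
        ((tokens.length : Int) - i').toNat < ((tokens.length : Int) - i).toNat →
        pvSim4 tokens d' i' := by
      intro d' i' h0' hlt
      exact IH (((tokens.length : Int) - i').toNat) (by omega) d' i' h0' le_rfl
    exact ⟨(pvPairCase tokens d i h0 Hsmall).1, (pvPairCase tokens d i h0 Hsmall).2,
      (pvAfterCase tokens d i h0 Hsmall).1, (pvAfterCase tokens d i h0 Hsmall).2⟩

-- ===== VERDICT (by name: the statements are the Claim_ definitions above) =====
theorem parse_pares_spec : Claim_unchanged_parse_pares := by
  intro tokens index _ hpre
  unfold Spec_parse_pares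
  intro hnd
  have hf : pvStuck (pvStream tokens index) (0 : Nat) 0 = false :=
    Bool.eq_false_iff.mpr (fun h => hnd h)
  have h := ((pvBsim tokens (((tokens.length : Int) - index).toNat) 0 index hpre le_rfl).1) hf
  unfold parse_pares parse_pares_alt
  exact (h.trans rfl).symm

theorem parse_pares_changed : Claim_changed_parse_pares := by
  unfold Claim_changed_parse_pares
  refine ⟨by decide, by decide, by decide, ?_, ?_, by decide⟩
  · show parse_pares pvWlit 0 = (true, 6)
    have h6 : (pvAStep pvWlit pvACall.paresLoop 6).val = (true, 6) := by
      rw [paresLoop_eq, if_neg (by decide)]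
    have hp3 : (pvAStep pvWlit pvACall.par 3).val = (true, 6) := by
      rw [par_eq, if_pos (by decide), if_pos (by decide), valor_eq, if_pos (by decide),
        if_neg (by decide), if_pos (by decide)]
      norm_num
    have hpares3 : (pvAStep pvWlit pvACall.pares 3).val = (true, 6) := by
      rw [pares_eq, hp3]
      norm_num [h6]
    have hval2 : (pvAStep pvWlit pvACall.valor 2).val = (true, 6) := by
      rw [valor_eq, if_pos (by decide), if_neg (by decide), if_neg (by decide), if_pos (by decide)]
      rw [objeto_snd pvWlit 2 (by decide) (by decide)]
      have h21 : (2 : Int) + 1 = 3 := by norm_num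
      rw [h21]
      norm_num [hpares3, adjustA]
      decide
    have hp0 : (pvAStep pvWlit pvACall.par 0).val = (true, 6) := by
      rw [par_eq, if_pos (by decide), if_pos (by decide)]
      have h02 : (0 : Int) + 2 = 2 := by norm_num
      rw [h02, hval2]
    rw [parse_pares, pares_eq, hp0]
    norm_num [h6]
  · show parse_pares_alt pvWlit 0 = (false, 6)
    rw [parse_pares_alt, pvBStep.eq_def]
    dsimp only
    rw [dif_pos (by decide), dif_pos (by decide), dif_pos (by decide), if_pos (by decide)]
    rw [pvBStep.eq_def]
    dsimp only
    rw [dif_pos (by decide), dif_pos (by decide), dif_pos (by decide), if_neg (by decide),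
      if_pos (by decide)]
    rw [pvBStep.eq_def]
    dsimp only
    rw [dif_neg (by decide), if_pos (by decide), dif_neg (by decide)]
    norm_num

theorem parse_pares_tight : Claim_exact_parse_pares := by
  intro tokens index _ hpre hd
  have h := ((pvBsim tokens (((tokens.length : Int) - index).toNat) 0 index hpre le_rfl).2.1) hd
  have h0 : unwindA tokens 0 (pvAStep tokens pvACall.pares index).val =
      (pvAStep tokens pvACall.pares index).val := rfl
  rw [h0] at h
  unfold parse_pares parse_pares_alt
  intro heq
  rcases h with ⟨hb, hT | hLt⟩
  · rw [heq] at hT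
    rw [hb] at hT
    exact Bool.false_ne_true hT
  · rw [heq] at hLt
    exact lt_irrefl _ hLt
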